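-- pv_equiv track=rewrite | github.com/Nowu/Python-100-Days | Day01-15/Day01/code/Lsystem2.py | split_rule
-- ===== SOURCE A (Python) =====
-- def split_rule(path):
--     lst = []
--     i = 0
--     while i < len(path):
--         if path[i] == 'F':
--             lst.append(path[i:i+2])
--             i = i+2
--         else:
--             lst.append(path[i])
--             i = i+1
--     return lst
-- ===== SOURCE B (Python) =====
-- import re
--
-- def split_rule(path):
--     return re.findall(r'F.|.', path, re.DOTALL)
-- ===== Notes on version B (the rewrite author's own statement) =====
-- stated objective: idiomatic
-- what changed: Replaced the explicit index-driven while loop with slicing by a single regex tokenization re.findall(r'F.|.', path, re.DOTALL), whose first alternative grabs a two-char token and whose fallback grabs any single character.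
import Mathlib
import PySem

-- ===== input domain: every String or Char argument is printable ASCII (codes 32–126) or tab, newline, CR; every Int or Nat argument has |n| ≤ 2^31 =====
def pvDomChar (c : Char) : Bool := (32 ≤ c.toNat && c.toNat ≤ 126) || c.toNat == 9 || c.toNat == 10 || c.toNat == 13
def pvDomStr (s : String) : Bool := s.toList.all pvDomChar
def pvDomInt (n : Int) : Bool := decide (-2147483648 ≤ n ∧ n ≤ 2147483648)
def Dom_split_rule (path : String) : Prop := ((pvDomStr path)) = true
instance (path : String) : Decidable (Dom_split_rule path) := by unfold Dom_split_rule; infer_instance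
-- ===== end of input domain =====

-- B replaces A's index-driven while loop with a single regex tokenization re.findall(r'F.|.', path, re.DOTALL) (idiomatic).

-- ===== PORT A =====
-- A's while-loop over index i; each step reads path[i] and appends path[i:i+2] or path[i].
def split_rule_loop (cs : List Char) (i : Nat) : List String :=
  if h : i < cs.length then
    if cs[i] = 'F' then
      String.ofList (PySem.Chars.slice cs (some (i : Int)) (some ((i : Int) + 2))) ::
        split_rule_loop cs (i + 2)
    else
      String.ofList [cs[i]] :: split_rule_loop cs (i + 1)
  else []
termination_by cs.length - i

def split_rule (path : String) : List String := split_rule_loop path.toList 0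

-- ===== PORT B =====
-- Hand port of re.findall(r'F.|.', path, re.DOTALL): at each position the regex engine first
-- tries the alternative 'F.' (an 'F' plus any one following character, DOTALL so '.' matches
-- newline too), else falls back to '.' (any single character). Exact for this pattern.
def split_rule_alt_scan : List Char → List String
  | [] => []
  | c :: rest =>
    if c = 'F' then
      match rest with
      | d :: rest' => String.ofList [c, d] :: split_rule_alt_scan rest'
      | [] => [String.ofList [c]]
    else String.ofList [c] :: split_rule_alt_scan rest

def split_rule_alt (path : String) : List String := split_rule_alt_scan path.toList

-- ===== PRECONDITION & SPEC =====
def Spec_split_rule (path : String) (out : List String) : Prop := out = split_rule_alt path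
instance (path : String) (out : List String) : Decidable (Spec_split_rule path out) := by unfold Spec_split_rule; infer_instance

-- ===== CLAIM (what is proved, stated in full; the proofs are below) =====
def Claim_equal_split_rule : Prop := ∀ (path : String), Dom_split_rule path → Spec_split_rule path (split_rule path)

-- ===== LEMMAS AND PROOFS =====
lemma split_rule_loop_eq_scan (cs : List Char) (i : Nat) :
    split_rule_loop cs i = split_rule_alt_scan (cs.drop i) := by
  by_cases h : i < cs.length
  · rw [split_rule_loop]
    have hd : cs.drop i = cs[i] :: cs.drop (i + 1) := List.drop_eq_getElem_cons h
    have hslice : PySem.Chars.slice cs (some (i : Int)) (some ((i : Int) + 2))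
        = (cs.drop i).take 2 := by
      have := PySem.List.slice_toNat (xs := cs) (a := (i : Int)) (b := (i : Int) + 2) (by omega) (by omega)
      have e : ((i : Int) + 2).toNat - i = 2 := by omega
      simpa [e] using this
    by_cases hF : cs[i] = 'F'
    · rw [hslice, hd]
      by_cases h2 : i + 1 < cs.length
      · have hd2 : cs.drop (i + 1) = cs[i+1] :: cs.drop (i + 2) := List.drop_eq_getElem_cons h2
        rw [hd2]
        simp [split_rule_alt_scan, hF, List.take, split_rule_loop_eq_scan cs (i + 2), h]
      · have he : cs.drop (i + 1) = [] := List.drop_eq_nil_of_le (by omega)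
        have he2 : cs.drop (i + 2) = [] := List.drop_eq_nil_of_le (by omega)
        rw [he]
        simp [split_rule_alt_scan, hF, List.take, split_rule_loop_eq_scan cs (i + 2), he2, h]
    · rw [hd]
      cases hdd : cs.drop (i + 1) with
      | nil => simp [split_rule_alt_scan, hF, split_rule_loop_eq_scan cs (i + 1), hdd, h]
      | cons d rest' => simp [split_rule_alt_scan, hF, split_rule_loop_eq_scan cs (i + 1), hdd, h]
  · rw [split_rule_loop]
    have : cs.drop i = [] := List.drop_eq_nil_of_le (by omega)
    simp [h, this, split_rule_alt_scan]
termination_by cs.length - i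

-- ===== VERDICT (by name: the statement is the Claim_ definition above) =====
theorem split_rule_spec : Claim_equal_split_rule := by
  intro path _
  unfold Spec_split_rule split_rule split_rule_alt
  simpa using split_rule_loop_eq_scan path.toList 0
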